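-- pv_equiv track=rewrite | github.com/PLSE-Lab/Python-MLAPI-expl | python_sources/kestimate-for-kiva-with-cleaned-combined-data.py | parsegender
-- ===== SOURCE A (Python) =====
-- def parsegender(v):
--     genderlist = []
--     if isinstance(v['borrower_genders'], str):
--         genderlist = v['borrower_genders'].split(',')
--     numfemale = 0
--     nummale = 0
--     for gender in genderlist:
--         if len(gender.strip()) == 6:
--             numfemale += 1
--         if len(gender.strip()) == 4:
--             nummale += 1
--     return numfemale, nummale
-- ===== SOURCE B (Python) =====
-- def parsegender(v):
--     g = v['borrower_genders']
--     numfemale = 0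
--     nummale = 0
--     if isinstance(g, str):
--         # character-level scan: no split(), no strip(), no token list.
--         # seen  = chars since the first non-space char of the current token
--         # trail = current run of trailing spaces; stripped length = seen - trail
--         seen = 0
--         trail = 0
--         for c in g:
--             if c == ',':
--                 n = seen - trail
--                 if n == 6:
--                     numfemale += 1
--                 if n == 4:
--                     nummale += 1
--                 seen = 0
--                 trail = 0
--             elif c.isspace():
--                 if seen > 0:
--                     seen += 1
--                     trail += 1
--             else:
--                 seen += 1
--                 trail = 0
--         n = seen - trail
--         if n == 6:
--             numfemale += 1
--         if n == 4:
--             nummale += 1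
--     return numfemale, nummale
-- ===== Notes on version B (the rewrite author's own statement) =====
-- stated objective: alternative
-- what changed: B never calls split or strip and builds no token list: it is a single character-level state machine over the raw string that tracks chars-since-first-nonspace and the trailing-space run, finalizing a token's stripped length at each comma and at end of string.
import Mathlib
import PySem

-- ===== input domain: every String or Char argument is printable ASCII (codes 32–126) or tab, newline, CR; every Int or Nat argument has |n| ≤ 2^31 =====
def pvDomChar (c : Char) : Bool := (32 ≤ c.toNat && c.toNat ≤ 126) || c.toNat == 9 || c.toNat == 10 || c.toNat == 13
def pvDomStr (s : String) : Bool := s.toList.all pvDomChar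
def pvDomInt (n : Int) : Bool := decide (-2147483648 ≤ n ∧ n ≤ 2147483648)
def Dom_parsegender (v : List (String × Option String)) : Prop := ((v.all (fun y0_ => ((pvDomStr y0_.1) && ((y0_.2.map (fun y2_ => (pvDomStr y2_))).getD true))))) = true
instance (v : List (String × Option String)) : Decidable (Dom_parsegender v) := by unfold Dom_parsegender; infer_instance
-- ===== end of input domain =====

-- B replaces A's split/strip/token-list pipeline with a single character-level state
-- machine over the raw string (alternative structure, same cost).

-- ===== PORT A =====
-- split into a token list, then two accumulators with a branch per target length, as in A
def parsegender (v : List (String × Option String)) : Int × Int :=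
  let genderlist : List String :=
    match (PySem.Dict.mk v).get? "borrower_genders" with
    | some (some s) => (PySem.Str.split? s ",").getD []
    | _ => []   -- 'some none' = the value is None: genderlist stays []; 'none' = KeyError, excluded by Pre_
  let r : Int × Int := genderlist.foldl
    (fun acc gender =>
      let acc := if PySem.Str.len (PySem.Str.strip gender) = 6 then (acc.1 + 1, acc.2) else acc
      if PySem.Str.len (PySem.Str.strip gender) = 4 then (acc.1, acc.2 + 1) else acc)
    (0, 0)
  r

-- ===== PORT B =====
-- one step of Source B's loop body on the state (numfemale, nummale, seen, trail)
def pvStepB (st : Int × Int × Int × Int) (c : Char) : Int × Int × Int × Int :=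
  match st with
  | (f, m, seen, trail) =>
    if c = ',' then
      let n := seen - trail
      let f := if n = 6 then f + 1 else f
      let m := if n = 4 then m + 1 else m
      (f, m, 0, 0)
    else if PySem.Chars.isspace c then
      if 0 < seen then (f, m, seen + 1, trail + 1) else (f, m, seen, trail)
    else (f, m, seen + 1, 0)

-- the code after the loop: count the last token
def pvFinishB (st : Int × Int × Int × Int) : Int × Int :=
  match st with
  | (f, m, seen, trail) =>
    let n := seen - trail
    let f := if n = 6 then f + 1 else f
    let m := if n = 4 then m + 1 else m
    (f, m)

-- character-level scan over the raw string: no split, no strip, no token list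
def parsegender_alt (v : List (String × Option String)) : Int × Int :=
  ((((PySem.Dict.mk v).get? "borrower_genders").bind id).elim (0, 0)
    (fun s => pvFinishB (s.toList.foldl pvStepB (0, 0, 0, 0))))

-- ===== PRECONDITION & SPEC =====
-- Pre_ excludes only inputs without the key "borrower_genders", on which A raises KeyError.
def Pre_parsegender (v : List (String × Option String)) : Prop :=
  "borrower_genders" ∈ v.map Prod.fst
instance (v : List (String × Option String)) : Decidable (Pre_parsegender v) := by
  unfold Pre_parsegender; infer_instance
def pvWitness_parsegender : (List (String × Option String)) :=
  [("borrower_genders", some "female, male")]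
def Spec_parsegender (v : List (String × Option String)) (out : Int × Int) : Prop := out = parsegender_alt v
instance (v : List (String × Option String)) (out : Int × Int) : Decidable (Spec_parsegender v out) := by unfold Spec_parsegender; infer_instance

-- ===== CLAIM (what is proved, stated in full; the proofs are below) =====
def Claim_equal_parsegender : Prop := ∀ (v : List (String × Option String)), Dom_parsegender v → Pre_parsegender v → Spec_parsegender v (parsegender v)

-- ===== LEMMAS AND PROOFS =====

-- small step lemmas unfolding pvStepB per branch
theorem pvStepB_comma (f m seen trail : Int) :
    pvStepB (f, m, seen, trail) ','
      = (if seen - trail = 6 then f + 1 else f,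
         if seen - trail = 4 then m + 1 else m, 0, 0) := by
  simp [pvStepB]

theorem pvStepB_ws {c : Char} (hws : PySem.Chars.isspace c = true) (hnc : c ≠ ',')
    (f m seen trail : Int) :
    pvStepB (f, m, seen, trail) c
      = if 0 < seen then (f, m, seen + 1, trail + 1) else (f, m, seen, trail) := by
  simp [pvStepB, hnc, hws]

theorem pvStepB_other {c : Char} (hws : PySem.Chars.isspace c = false) (hnc : c ≠ ',')
    (f m seen trail : Int) :
    pvStepB (f, m, seen, trail) c = (f, m, seen + 1, 0) := by
  simp [pvStepB, hnc, hws]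

-- takeWhile ignores what comes after a failing element
theorem pvTakeWhileAppend {α : Type} (p : α → Bool) (xs ys : List α)
    (h : ∃ x ∈ xs, ¬ (p x = true)) : (xs ++ ys).takeWhile p = xs.takeWhile p := by
  induction xs with
  | nil => simp at h
  | cons a xs ih =>
    by_cases ha : p a
    · simp only [List.cons_append, List.takeWhile_cons, ha, if_pos]
      obtain ⟨x, hx, hxp⟩ := h
      rcases List.mem_cons.mp hx with hx | hx
      · exact absurd ha (by rw [hx] at hxp; simpa using hxp)
      · rw [ih ⟨x, hx, hxp⟩]
    · simp [ha]

-- structural-recursion equivalent of PySem.Chars.splitOn on the one-char separator ","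
def pvSplit : List Char → List (List Char)
  | [] => [[]]
  | c :: cs => if c = ',' then [] :: pvSplit cs else (pvSplit cs).modifyHead (c :: ·)

theorem pvSplit_ne_nil (cs : List Char) : pvSplit cs ≠ [] := by
  induction cs with
  | nil => simp [pvSplit]
  | cons c cs ih =>
    by_cases h : c = ','
    · simp [pvSplit, h]
    · simp only [pvSplit, h, ite_false]
      cases hs : pvSplit cs with
      | nil => exact absurd hs ih
      | cons t ts => simp [List.modifyHead]

theorem pvGo_spec (fuel : Nat) (l cur : List Char) (acc : List (List Char))
    (h : l.length < fuel) :
    PySem.Chars.splitOn.go [','] fuel l cur acc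
      = acc.reverse ++ (pvSplit l).modifyHead (cur.reverse ++ ·) := by
  induction fuel generalizing l cur acc with
  | zero => omega
  | succ fuel ih =>
    cases l with
    | nil => simp [PySem.Chars.splitOn.go, pvSplit, List.modifyHead]
    | cons c rest =>
      simp only [PySem.Chars.splitOn.go]
      by_cases hc : c = ','
      · have hp : List.isPrefixOf [','] (c :: rest) = true := by simp [hc, List.isPrefixOf]
        rw [if_pos hp]
        subst hc
        simp only [List.length_cons, List.length_nil, List.drop_succ_cons, List.drop_zero]
        rw [ih rest [] _ (by simpa using Nat.lt_of_succ_lt_succ h)]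
        cases hs : pvSplit rest with
        | nil => exact absurd hs (pvSplit_ne_nil rest)
        | cons t ts => simp [pvSplit, hs, List.modifyHead]
      · have hp : List.isPrefixOf [','] (c :: rest) = false := by
          simp only [List.isPrefixOf, Bool.and_eq_false_iff, beq_eq_false_iff_ne, ne_eq]
          exact Or.inl fun h' => hc h'.symm
        rw [if_neg (by simp [hp])]
        rw [ih rest (c :: cur) acc (by simpa using Nat.lt_of_succ_lt_succ h)]
        cases hs : pvSplit rest with
        | nil => exact absurd hs (pvSplit_ne_nil rest)
        | cons t ts => simp [pvSplit, hs, hc, List.modifyHead]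

theorem pvSplitOn_eq (cs : List Char) : PySem.Chars.splitOn cs [','] = pvSplit cs := by
  rw [PySem.Chars.splitOn, pvGo_spec (cs.length + 1) cs [] [] (by omega)]
  cases hs : pvSplit cs with
  | nil => exact absurd hs (pvSplit_ne_nil cs)
  | cons t ts => simp [List.modifyHead]

-- no token produced by pvSplit contains a comma
theorem pvSplit_no_comma (cs : List Char) : ∀ t ∈ pvSplit cs, ∀ c ∈ t, c ≠ ',' := by
  induction cs with
  | nil =>
    intro t ht d hd
    simp [pvSplit] at ht
    simp [ht] at hd
  | cons c cs ih =>
    intro t ht d hd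
    by_cases h : c = ','
    · rw [show pvSplit (c :: cs) = [] :: pvSplit cs by simp [pvSplit, h]] at ht
      rcases List.mem_cons.mp ht with ht | ht
      · simp [ht] at hd
      · exact ih t ht d hd
    · rw [show pvSplit (c :: cs) = (pvSplit cs).modifyHead (c :: ·) by
        simp [pvSplit, h]] at ht
      cases hs : pvSplit cs with
      | nil => exact absurd hs (pvSplit_ne_nil cs)
      | cons u us =>
        rw [hs, List.modifyHead] at ht
        rcases List.mem_cons.mp ht with ht | ht
        · subst ht
          rcases List.mem_cons.mp hd with hd | hd
          · rw [hd]; exact h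
          · exact ih u (by rw [hs]; exact List.mem_cons_self ..) d hd
        · exact ih t (by rw [hs]; exact List.mem_cons_of_mem _ ht) d hd

-- glue tokens back with commas (the inverse of pvSplit)
def pvGlue : List (List Char) → List Char
  | [] => []
  | [t] => t
  | t :: ts@(_ :: _) => t ++ ',' :: pvGlue ts

theorem pvGlue_singleton (t : List Char) : pvGlue [t] = t := by simp [pvGlue]

theorem pvGlue_cons₂ (t u : List Char) (us : List (List Char)) :
    pvGlue (t :: u :: us) = t ++ ',' :: pvGlue (u :: us) := by simp [pvGlue]

theorem pvGlue_pvSplit (cs : List Char) : pvGlue (pvSplit cs) = cs := by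
  induction cs with
  | nil => simp [pvSplit, pvGlue]
  | cons c cs ih =>
    by_cases h : c = ','
    · subst h
      rw [show pvSplit (',' :: cs) = [] :: pvSplit cs by simp [pvSplit]]
      cases hs : pvSplit cs with
      | nil => exact absurd hs (pvSplit_ne_nil cs)
      | cons t ts => rw [hs] at ih; rw [pvGlue_cons₂, ih]; rfl
    · rw [show pvSplit (c :: cs) = (pvSplit cs).modifyHead (c :: ·) by simp [pvSplit, h]]
      cases hs : pvSplit cs with
      | nil => exact absurd hs (pvSplit_ne_nil cs)
      | cons t ts =>
        rw [hs] at ih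
        cases ts with
        | nil =>
          rw [List.modifyHead, pvGlue_singleton]
          rw [pvGlue_singleton] at ih
          rw [ih]
        | cons u us =>
          rw [List.modifyHead, pvGlue_cons₂, List.cons_append, ← pvGlue_cons₂, ih]

-- scanning from a positive 'seen': seen advances by the length, trail tracks the trailing space run
theorem pvScan_pos (u : List Char) (hu : ∀ c ∈ u, c ≠ ',') (f m s0 t0 : Int) (hs : 0 < s0) :
    u.foldl pvStepB (f, m, s0, t0)
      = (f, m, s0 + u.length,
          if u.all PySem.Chars.isspace then t0 + u.length
          else ((u.reverse.takeWhile PySem.Chars.isspace).length : Int)) := by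
  induction u generalizing s0 t0 with
  | nil => simp
  | cons c u ih =>
    have hnc : c ≠ ',' := hu c (List.mem_cons_self ..)
    have hu' : ∀ c ∈ u, c ≠ ',' := fun c hc => hu c (List.mem_cons_of_mem _ hc)
    by_cases hws : PySem.Chars.isspace c = true
    · rw [List.foldl_cons, pvStepB_ws hws hnc, if_pos hs, ih hu' (s0 + 1) (t0 + 1) (by omega)]
      by_cases hall : u.all PySem.Chars.isspace
      · have hall' : ((c :: u).all PySem.Chars.isspace) = true := by simp [hall, hws]
        simp only [hall, hall', if_pos, Prod.mk.injEq, List.length_cons]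
        and_intros <;> first | trivial | (push_cast; ring)
      · have hnall : ((c :: u).all PySem.Chars.isspace) = false := by
          simp only [List.all_cons, hws, Bool.true_and]
          simpa using hall
        have hex : ∃ x ∈ u.reverse, ¬ (PySem.Chars.isspace x = true) := by
          simp only [List.all_eq_true] at hall
          push Not at hall
          obtain ⟨x, hx, hxp⟩ := hall
          exact ⟨x, by simpa using hx, by simpa using hxp⟩
        rw [show (c :: u).reverse = u.reverse ++ [c] by simp]
        rw [pvTakeWhileAppend _ _ _ hex]
        simp only [hall, hnall, Bool.false_eq_true, if_false, Prod.mk.injEq,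
          List.length_cons]
        and_intros <;> first | trivial | (push_cast; ring)
    · have hws' : PySem.Chars.isspace c = false := by simpa using hws
      rw [List.foldl_cons, pvStepB_other hws' hnc, ih hu' (s0 + 1) 0 (by omega)]
      have hnall : ((c :: u).all PySem.Chars.isspace) = false := by simp [hws']
      by_cases hall : u.all PySem.Chars.isspace
      · have htw : (u.reverse ++ [c]).takeWhile PySem.Chars.isspace = u.reverse := by
          rw [List.takeWhile_append]
          have h1 : u.reverse.takeWhile PySem.Chars.isspace = u.reverse :=
            List.takeWhile_eq_self_iff.mpr fun x hx =>
              (List.all_eq_true.mp hall) x (by simpa using hx)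
          simp [h1, hws']
        rw [show (c :: u).reverse = u.reverse ++ [c] by simp]
        simp only [hall, hnall, Bool.false_eq_true, if_pos, if_false, htw,
          List.length_cons, List.length_reverse, Prod.mk.injEq]
        and_intros <;> first | trivial | (push_cast; ring)
      · have hex : ∃ x ∈ u.reverse, ¬ (PySem.Chars.isspace x = true) := by
          simp only [List.all_eq_true] at hall
          push Not at hall
          obtain ⟨x, hx, hxp⟩ := hall
          exact ⟨x, by simpa using hx, by simpa using hxp⟩
        rw [show (c :: u).reverse = u.reverse ++ [c] by simp]
        rw [pvTakeWhileAppend _ _ _ hex]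
        simp only [hall, hnall, Bool.false_eq_true, if_false, Prod.mk.injEq,
          List.length_cons]
        and_intros <;> first | trivial | (push_cast; ring)

-- scanning one comma-free token from (f, m, 0, 0): seen - trail is the stripped length
theorem pvScan_token (t : List Char) (ht : ∀ c ∈ t, c ≠ ',') (f m : Int) :
    ∃ seen trail : Int,
      t.foldl pvStepB (f, m, 0, 0) = (f, m, seen, trail)
        ∧ seen - trail = ((PySem.Chars.strip t).length : Int) := by
  induction t with
  | nil =>
    exact ⟨0, 0, rfl, by simp [PySem.Chars.strip, PySem.Chars.lstrip, PySem.Chars.rstrip]⟩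
  | cons c u ih =>
    have hnc : c ≠ ',' := ht c (List.mem_cons_self ..)
    have hu : ∀ c ∈ u, c ≠ ',' := fun c hc => ht c (List.mem_cons_of_mem _ hc)
    by_cases hws : PySem.Chars.isspace c = true
    · -- leading whitespace: state unchanged, strip unchanged
      obtain ⟨seen, trail, heq, hlen⟩ := ih hu
      refine ⟨seen, trail, ?_, ?_⟩
      · rw [List.foldl_cons, pvStepB_ws hws hnc, if_neg (by omega)]
        exact heq
      · rw [show PySem.Chars.strip (c :: u) = PySem.Chars.strip u by
          simp [PySem.Chars.strip, PySem.Chars.lstrip, hws]]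
        exact hlen
    · -- first non-space char: seen goes to 1, then pvScan_pos describes the rest
      have hws' : PySem.Chars.isspace c = false := by simpa using hws
      rw [List.foldl_cons, pvStepB_other hws' hnc]
      rw [show (0 : Int) + 1 = 1 from rfl]
      rw [pvScan_pos u hu f m 1 0 (by omega)]
      have hstrip : PySem.Chars.strip (c :: u)
          = ((u.reverse ++ [c]).dropWhile PySem.Chars.isspace).reverse := by
        simp [PySem.Chars.strip, PySem.Chars.lstrip, PySem.Chars.rstrip, hws']
      by_cases hall : u.all PySem.Chars.isspace
      · have hdw : (u.reverse ++ [c]).dropWhile PySem.Chars.isspace = [c] := by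
          rw [List.dropWhile_append]
          have h1 : u.reverse.dropWhile PySem.Chars.isspace = [] :=
            List.dropWhile_eq_nil_iff.mpr fun x hx =>
              (List.all_eq_true.mp hall) x (by simpa using hx)
          simp [h1, hws']
        refine ⟨1 + u.length, 0 + u.length, by simp [hall], ?_⟩
        rw [hstrip, hdw]
        simp
      · have hex : ∃ x ∈ u.reverse, ¬ (PySem.Chars.isspace x = true) := by
          simp only [List.all_eq_true] at hall
          push Not at hall
          obtain ⟨x, hx, hxp⟩ := hall
          exact ⟨x, by simpa using hx, by simpa using hxp⟩
        have hne : u.reverse.dropWhile PySem.Chars.isspace ≠ [] := by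
          intro hnil
          obtain ⟨x, hx, hxp⟩ := hex
          exact hxp ((List.dropWhile_eq_nil_iff.mp hnil) x hx)
        have hdw : (u.reverse ++ [c]).dropWhile PySem.Chars.isspace
            = u.reverse.dropWhile PySem.Chars.isspace ++ [c] := by
          rw [List.dropWhile_append]
          simp [List.isEmpty_iff, hne]
        refine ⟨1 + u.length, ((u.reverse.takeWhile PySem.Chars.isspace).length : Int),
          by simp [hall], ?_⟩
        rw [hstrip, hdw]
        have hsum : (u.reverse.takeWhile PySem.Chars.isspace).length
            + (u.reverse.dropWhile PySem.Chars.isspace).length = u.length := by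
          rw [← List.length_append, List.takeWhile_append_dropWhile, List.length_reverse]
        simp only [List.length_reverse, List.length_append, List.length_cons,
          List.length_nil]
        push_cast
        omega

-- A's fold over a token list, written as a function of the char-level tokens
def pvCountA (toks : List (List Char)) (f m : Int) : Int × Int :=
  toks.foldl
    (fun acc t =>
      let acc := if ((PySem.Chars.strip t).length : Int) = 6 then (acc.1 + 1, acc.2) else acc
      if ((PySem.Chars.strip t).length : Int) = 4 then (acc.1, acc.2 + 1) else acc)
    (f, m)

theorem pvCountA_cons (t : List Char) (ts : List (List Char)) (f m : Int) :
    pvCountA (t :: ts) f m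
      = pvCountA ts (if ((PySem.Chars.strip t).length : Int) = 6 then f + 1 else f)
          (if ((PySem.Chars.strip t).length : Int) = 4 then m + 1 else m) := by
  simp only [pvCountA, List.foldl_cons]
  congr 1
  by_cases h6 : ((PySem.Chars.strip t).length : Int) = 6 <;>
    by_cases h4 : ((PySem.Chars.strip t).length : Int) = 4 <;>
    simp [h6, h4]

-- B's scan over tokens glued with commas equals A's count over the token list
theorem pvScan_glue (toks : List (List Char)) (htoks : ∀ t ∈ toks, ∀ c ∈ t, c ≠ ',')
    (hne : toks ≠ []) (f m : Int) :
    pvFinishB ((pvGlue toks).foldl pvStepB (f, m, 0, 0)) = pvCountA toks f m := by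
  induction toks generalizing f m with
  | nil => exact absurd rfl hne
  | cons t ts ih =>
    obtain ⟨seen, trail, heq, hlen⟩ := pvScan_token t (htoks t (List.mem_cons_self ..)) f m
    cases ts with
    | nil =>
      rw [pvGlue_singleton, heq, pvCountA_cons]
      simp only [pvFinishB, pvCountA, List.foldl_nil, hlen]
    | cons u us =>
      rw [pvGlue_cons₂, List.foldl_append, heq, List.foldl_cons, pvStepB_comma, hlen]
      rw [ih (fun t' ht' => htoks t' (List.mem_cons_of_mem _ ht')) (by simp)]
      simp only [pvCountA_cons]

-- ===== VERDICT (by name: the statement is the Claim_ definition above) =====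
theorem parsegender_spec : Claim_equal_parsegender := by
  intro v _ _
  unfold Spec_parsegender parsegender parsegender_alt
  cases h : (PySem.Dict.mk v).get? "borrower_genders" with
  | none => rfl
  | some o =>
    cases o with
    | none => rfl
    | some s =>
      dsimp only [Option.bind_some, id, Option.elim_some]
      -- identify A's token list with pvSplit of the characters
      have hsplit : ∃ L : List String, PySem.Str.split? s "," = some L
          ∧ L.map String.toList = pvSplit s.toList := by
        have hmap := PySem.Str.split?_map s ","
        rw [show ("," : String).toList = [','] from rfl] at hmap
        rw [show PySem.Chars.split? s.toList [','] =
            some (PySem.Chars.splitOn s.toList [',']) by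
          simp [PySem.Chars.split?]] at hmap
        cases hL : PySem.Str.split? s "," with
        | none => rw [hL] at hmap; simp at hmap
        | some L =>
          rw [hL] at hmap
          refine ⟨L, rfl, ?_⟩
          simpa [pvSplitOn_eq] using hmap
      obtain ⟨L, hL, hLmap⟩ := hsplit
      rw [hL]
      have hlen : ∀ x : String, PySem.Str.len (PySem.Str.strip x)
          = ((PySem.Chars.strip x.toList).length : Int) := by
        intro x
        rw [show PySem.Str.len (PySem.Str.strip x)
            = PySem.Chars.len (PySem.Str.strip x).toList by simp [PySem.Str.len_eq]]
        rw [PySem.Str.toList_strip, PySem.Chars.len_eq]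
      have hA : L.foldl
          (fun acc gender =>
            let acc := if PySem.Str.len (PySem.Str.strip gender) = 6 then (acc.1 + 1, acc.2) else acc
            if PySem.Str.len (PySem.Str.strip gender) = 4 then (acc.1, acc.2 + 1) else acc)
          ((0 : Int), (0 : Int)) = pvCountA (L.map String.toList) 0 0 := by
        simp only [hlen]
        rw [pvCountA, List.foldl_map]
      rw [Option.getD_some, hA, hLmap]
      rw [← pvScan_glue (pvSplit s.toList) (pvSplit_no_comma s.toList)
        (pvSplit_ne_nil s.toList) 0 0, pvGlue_pvSplit]
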